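-- pv_equiv track=rewrite | github.com/DragunWF/Competitive-Programming | CodeWars/python/7_kyu/apparently-modifying_strings.py | apparently
-- ===== SOURCE A (Python) =====
-- def apparently(s: str) -> str:
--     if not s:
--         return ""
--     words = s.split(" ")
--     modified_sentence = []
--     for i, word in enumerate(words):
--         modified_sentence.append(word)
--         if (word == "and" or word == "but") and (i + 1 <= len(words) and (i + 1 == len(words) or words[i + 1] != "apparently")):
--             modified_sentence.append("apparently")
--     return " ".join(modified_sentence)
-- ===== SOURCE B (Python) =====
-- def apparently(s: str) -> str:
--     if not s:
--         return ""
--     # pass 1: insert a sentinel marker after every trigger word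
--     marked = []
--     for word in s.split(" "):
--         marked.append(word)
--         if word in ("and", "but"):
--             marked.append(None)
--     # pass 2: resolve markers right-to-left against the following word
--     out = []
--     nxt = None
--     for x in reversed(marked):
--         if x is None:
--             if nxt != "apparently":
--                 out.append("apparently")
--         else:
--             out.append(x)
--             nxt = x
--     out.reverse()
--     return " ".join(out)
-- ===== Notes on version B (the rewrite author's own statement) =====
-- stated objective: alternative
-- what changed: Replaced A's single pass with index lookahead by two staged passes: first insert a sentinel marker after every and/but, then a reverse scan that resolves each marker against the word that follows it (dropping it when that word is already 'apparently'), reversing the output at the end.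
import Mathlib
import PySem

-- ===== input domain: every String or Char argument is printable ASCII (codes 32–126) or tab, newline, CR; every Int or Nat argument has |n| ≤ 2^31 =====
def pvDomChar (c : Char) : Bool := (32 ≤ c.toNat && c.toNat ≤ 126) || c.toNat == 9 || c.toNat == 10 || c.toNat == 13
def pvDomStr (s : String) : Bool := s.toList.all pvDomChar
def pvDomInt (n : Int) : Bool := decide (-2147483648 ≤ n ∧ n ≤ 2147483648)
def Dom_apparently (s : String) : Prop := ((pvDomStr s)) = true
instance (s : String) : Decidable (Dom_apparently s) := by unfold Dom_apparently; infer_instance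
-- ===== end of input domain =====

-- B replaces A's single lookahead pass by two staged passes (insert sentinel markers, then a
-- reverse scan resolving each marker against the following word); alternative decomposition, same cost.

-- ===== PORT A =====
-- loop body of A: append the word, then lookahead via words[i+1]
-- (pyGetD is evaluated only when i+1 < len(words), where it equals words[i+1] exactly)
def apparentlyAStep (words : List String) (acc : List String) (p : Int × String) : List String :=
  let acc' := acc ++ [p.2]
  if (p.2 == "and" || p.2 == "but") &&
     (decide (p.1 + 1 ≤ (words.length : Int)) &&
       (decide (p.1 + 1 = (words.length : Int)) || PySem.List.pyGetD words (p.1 + 1) "" != "apparently")) then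
    acc' ++ ["apparently"]
  else acc'

def apparently (s : String) : String :=
  if s = "" then "" else
    -- sep " " is nonempty, so split? is always `some`; getD never takes the default
    let words := (PySem.Str.split? s " ").getD []
    let ms := (PySem.List.enumerate words).foldl (apparentlyAStep words) []
    PySem.Str.join " " ms

-- ===== PORT B =====
-- pass 1 body: append the word and, after a trigger word, a sentinel marker (`none`)
def apparentlyMarkStep (acc : List (Option String)) (w : String) : List (Option String) :=
  let acc' := acc ++ [some w]
  if w == "and" || w == "but" then acc' ++ [none] else acc'

-- pass 2 body (run over the reversed marked list): state = (output so far, word seen last = forward-next word)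
def apparentlyResolveStep (st : List String × Option String) (x : Option String) : List String × Option String :=
  match x with
  | none => (if st.2 != some "apparently" then st.1 ++ ["apparently"] else st.1, st.2)
  | some w => (st.1 ++ [w], some w)

def apparently_alt (s : String) : String :=
  if s = "" then "" else
    let marked := ((PySem.Str.split? s " ").getD []).foldl apparentlyMarkStep []
    let st := marked.reverse.foldl apparentlyResolveStep (([], none) : List String × Option String)
    PySem.Str.join " " st.1.reverse

-- ===== PRECONDITION & SPEC =====
def Spec_apparently (s : String) (out : String) : Prop := out = apparently_alt s
instance (s : String) (out : String) : Decidable (Spec_apparently s out) := by unfold Spec_apparently; infer_instance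

-- ===== CLAIM (what is proved, stated in full; the proofs are below) =====
def Claim_equal_apparently : Prop := ∀ (s : String), Dom_apparently s → Spec_apparently s (apparently s)

-- ===== LEMMAS AND PROOFS =====

-- "the next word (if any) is not 'apparently'": A's lookahead condition
def nextOK : List String → Bool
  | [] => true
  | n :: _ => n != "apparently"

-- recursive characterisation of A's loop result
def aRec : List String → List String
  | [] => []
  | w :: t => w :: ((if (w == "and" || w == "but") && nextOK t then ["apparently"] else []) ++ aRec t)

-- recursive characterisation of B's pass 1
def markRec : List String → List (Option String)
  | [] => []
  | w :: t => some w :: ((if w == "and" || w == "but" then [none] else []) ++ markRec t)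

-- recursive characterisation of B's pass 2: items appended (in order) and the final `nxt`
def resolveRec : List (Option String) → Option String → List String × Option String
  | [], nxt => ([], nxt)
  | none :: t, nxt =>
    let r := resolveRec t nxt
    ((if nxt != some "apparently" then ["apparently"] else []) ++ r.1, r.2)
  | some w :: t, _ =>
    let r := resolveRec t (some w)
    (w :: r.1, r.2)

lemma aFold (full : List String) :
    ∀ (t : List String) (k : Nat) (acc : List String), full.drop k = t →
      (PySem.List.enumerate t (k : Int)).foldl (apparentlyAStep full) acc = acc ++ aRec t := by
  intro t
  induction t with
  | nil => intro k acc _; simp [PySem.List.enumerate, aRec]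
  | cons w t ih =>
    intro k acc hdrop
    have hk : k < full.length := by
      by_contra h
      simp [List.drop_eq_nil_of_le (Nat.le_of_not_lt h)] at hdrop
    have hdrop' : full.drop (k + 1) = t := by
      have := congrArg (List.drop 1) hdrop
      simpa [List.drop_drop, Nat.add_comm] using this
    have hlen : full.length = k + 1 + t.length := by
      have := congrArg List.length hdrop
      simp at this
      omega
    rw [PySem.List.enumerate_cons, List.foldl_cons]
    have hstep : apparentlyAStep full acc ((k : Int), w) = acc ++ [w] ++
        (if (w == "and" || w == "but") && nextOK t then ["apparently"] else []) := by
      unfold apparentlyAStep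
      cases t with
      | nil =>
        simp only [List.length_nil] at hlen
        have h2 : ((k : Int) + 1 = (full.length : Int)) := by omega
        rw [h2]
        simp only [nextOK, le_refl, decide_true, Bool.true_or, Bool.and_true]
        split <;> simp
      | cons n t' =>
        simp only [List.length_cons] at hlen
        have h1 : ((k : Int) + 1 ≤ (full.length : Int)) := by omega
        have h2 : ¬ ((k : Int) + 1 = (full.length : Int)) := by omega
        have hget : PySem.List.pyGetD full ((k : Int) + 1) "" = n := by
          have hc : ((k : Int) + 1) = ((k + 1 : Nat) : Int) := by push_cast; ring
          rw [hc, PySem.List.pyGetD_natCast]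
          have : full.getD (k + 1) "" = (full.drop (k + 1)).getD 0 "" := by
            simp [List.getD, List.getElem?_drop]
          rw [this, hdrop']
          rfl
        simp only [h1, h2, hget, nextOK, decide_true, decide_false, Bool.false_or, Bool.true_and]
        split <;> simp
    rw [hstep]
    have hcast : ((k : Int) + 1) = ((k + 1 : Nat) : Int) := by push_cast; ring
    rw [hcast, ih (k + 1) _ hdrop']
    simp [aRec]

-- B's pass 1 fold equals markRec
lemma markFold : ∀ (ws : List String) (acc : List (Option String)),
    ws.foldl apparentlyMarkStep acc = acc ++ markRec ws := by
  intro ws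
  induction ws with
  | nil => intro acc; simp [markRec]
  | cons w t ih =>
    intro acc
    rw [List.foldl_cons, ih]
    unfold apparentlyMarkStep
    simp only [markRec]
    split <;> simp

-- B's pass 2 fold equals resolveRec
lemma resolveFold : ∀ (m : List (Option String)) (out : List String) (nxt : Option String),
    m.foldl apparentlyResolveStep (out, nxt) = (out ++ (resolveRec m nxt).1, (resolveRec m nxt).2) := by
  intro m
  induction m with
  | nil => intro out nxt; simp [resolveRec]
  | cons x t ih =>
    intro out nxt
    cases x with
    | none =>
      rw [List.foldl_cons]
      show t.foldl apparentlyResolveStep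
        (if nxt != some "apparently" then out ++ ["apparently"] else out, nxt) = _
      by_cases h : nxt = some "apparently"
      · simp [h, ih, resolveRec]
      · have hne : (nxt != some "apparently") = true := by
          cases nxt <;> simp_all
        simp [hne, ih, resolveRec]
    | some w =>
      rw [List.foldl_cons]
      show t.foldl apparentlyResolveStep (out ++ [w], some w) = _
      simp [ih, resolveRec]

lemma resolveRec_append : ∀ (a b : List (Option String)) (nxt : Option String),
    resolveRec (a ++ b) nxt =
      ((resolveRec a nxt).1 ++ (resolveRec b (resolveRec a nxt).2).1,
       (resolveRec b (resolveRec a nxt).2).2) := by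
  intro a
  induction a with
  | nil => intro b nxt; simp [resolveRec]
  | cons x t ih =>
    intro b nxt
    cases x <;> simp [resolveRec, ih]

-- key lemma: resolving the reversed marked list yields A's result, reversed
lemma resolve_mark (ws : List String) :
    resolveRec (markRec ws).reverse none = ((aRec ws).reverse, ws.head?) := by
  induction ws with
  | nil => simp [markRec, aRec, resolveRec]
  | cons w t ih =>
    have hrev : (markRec (w :: t)).reverse =
        (markRec t).reverse ++ ((if w == "and" || w == "but" then [none] else []).reverse ++ [some w]) := by
      simp [markRec]
    rw [hrev, resolveRec_append, ih]
    have hnxt : ((t.head? != some "apparently") : Bool) = nextOK t := by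
      cases t with
      | nil => rfl
      | cons n t' => simp [nextOK, bne]
    by_cases hw : (w == "and" || w == "but") = true
    · simp only [hw, if_true, List.reverse_singleton]
      simp [resolveRec, hnxt, aRec, hw]
      split <;> simp
    · simp only [hw]
      simp [resolveRec, aRec, hw]

-- ===== VERDICT (by name: the statement is the Claim_ definition above) =====
theorem apparently_spec : Claim_equal_apparently := by
  intro s _
  unfold Spec_apparently apparently apparently_alt
  by_cases hs : s = ""
  · simp [hs]
  · simp only [hs, if_false]
    rw [markFold, List.nil_append, resolveFold, List.nil_append]
    have hA := aFold ((PySem.Str.split? s " ").getD []) ((PySem.Str.split? s " ").getD []) 0 []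
      (by simp)
    simp only [Nat.cast_zero] at hA
    rw [hA, resolve_mark]
    simp
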